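-- pv_equiv track=rewrite | github.com/GRAIL-center/agora-mi | src/policy_interp/activation_oracle.py | _canonical_obligation_family
-- ===== SOURCE A (Python) =====
-- AO_OBLIGATION_FAMILIES = (
--     "privacy",
--     "bias",
--     "discrimination",
--     "transparency",
--     "rights_violation",
--     "interpretability",
--     "governance_other",
-- )
--
-- def _canonical_obligation_family(value: str) -> str:
--     lowered = value.strip().lower()
--     if lowered in AO_OBLIGATION_FAMILIES:
--         return lowered
--     for family in AO_OBLIGATION_FAMILIES:
--         if family in lowered:
--             return family
--     if "human rights" in lowered or "civil rights" in lowered: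
--         return "rights_violation"
--     if "explain" in lowered:
--         return "interpretability"
--     if "fair" in lowered or "bias" in lowered:
--         return "bias"
--     if "privacy" in lowered or "data" in lowered:
--         return "privacy"
--     if "transparen" in lowered or "notice" in lowered:
--         return "transparency"
--     return "governance_other"
-- ===== SOURCE B (Python) =====
-- _RULES = (
--     ("privacy", "privacy"),
--     ("bias", "bias"),
--     ("discrimination", "discrimination"),
--     ("transparency", "transparency"),
--     ("rights_violation", "rights_violation"),
--     ("interpretability", "interpretability"),
--     ("governance_other", "governance_other"),
--     ("human rights", "rights_violation"),
--     ("civil rights", "rights_violation"),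
--     ("explain", "interpretability"),
--     ("fair", "bias"),
--     ("data", "privacy"),
--     ("transparen", "transparency"),
--     ("notice", "transparency"),
-- )
--
--
-- def _canonical_obligation_family(value: str) -> str:
--     # Position-major single pass: walk the lowered string once, keeping the best
--     # (lowest-precedence-index) rule whose needle starts at some visited position.
--     lowered = value.strip().lower()
--     best = len(_RULES)
--     for pos in range(len(lowered)):
--         for i in range(best):  # only rules that would improve on the current best
--             if lowered.startswith(_RULES[i][0], pos):
--                 best = i
--                 break
--     return _RULES[best][1] if best < len(_RULES) else "governance_other"
-- ===== Notes on version B (the rewrite author's own statement) =====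
-- stated objective: alternative
-- what changed: Replaces A's exact-match check, family substring loop and keyword if-cascade with a position-major single pass: walk the lowered string once keeping the lowest matching rule index as an accumulator, testing at each position only rules that would improve the current best for a prefix match (no substring search calls at all).
import Mathlib
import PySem

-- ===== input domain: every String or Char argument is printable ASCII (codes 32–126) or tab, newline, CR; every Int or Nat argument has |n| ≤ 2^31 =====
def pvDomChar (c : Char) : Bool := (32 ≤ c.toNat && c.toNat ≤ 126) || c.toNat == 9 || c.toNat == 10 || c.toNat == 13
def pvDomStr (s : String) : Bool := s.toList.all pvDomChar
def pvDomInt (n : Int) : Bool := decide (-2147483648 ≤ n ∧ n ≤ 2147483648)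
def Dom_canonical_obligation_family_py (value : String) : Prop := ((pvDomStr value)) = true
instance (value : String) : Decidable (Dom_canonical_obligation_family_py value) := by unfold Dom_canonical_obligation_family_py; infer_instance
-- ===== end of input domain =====

-- B replaces A's exact-match check + family loop + keyword if-cascade with a single
-- position-major pass over the lowered string keeping the best rule index (objective: alternative).

-- ===== PORT A =====
def aoObligationFamilies : List String :=
  ["privacy", "bias", "discrimination", "transparency", "rights_violation",
   "interpretability", "governance_other"]

-- the 'for family in AO_OBLIGATION_FAMILIES' loop (first family contained in lowered)
def aFamilyLoop (lowered : String) : List String → Option String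
  | [] => none
  | f :: rest => if PySem.Str.isIn f lowered then some f else aFamilyLoop lowered rest

def canonical_obligation_family_py (value : String) : String :=
  let lowered := PySem.Str.lower (PySem.Str.strip value)
  if aoObligationFamilies.contains lowered then lowered
  else
    match aFamilyLoop lowered aoObligationFamilies with
    | some f => f
    | none =>
      if PySem.Str.isIn "human rights" lowered || PySem.Str.isIn "civil rights" lowered then
        "rights_violation"
      else if PySem.Str.isIn "explain" lowered then "interpretability"
      else if PySem.Str.isIn "fair" lowered || PySem.Str.isIn "bias" lowered then "bias"
      else if PySem.Str.isIn "privacy" lowered || PySem.Str.isIn "data" lowered then "privacy"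
      else if PySem.Str.isIn "transparen" lowered || PySem.Str.isIn "notice" lowered then
        "transparency"
      else "governance_other"

-- ===== PORT B =====
def bRules : List (String × String) :=
  [("privacy", "privacy"), ("bias", "bias"), ("discrimination", "discrimination"),
   ("transparency", "transparency"), ("rights_violation", "rights_violation"),
   ("interpretability", "interpretability"), ("governance_other", "governance_other"),
   ("human rights", "rights_violation"), ("civil rights", "rights_violation"),
   ("explain", "interpretability"), ("fair", "bias"), ("data", "privacy"),
   ("transparen", "transparency"), ("notice", "transparency")]

-- inner loop: first rule index i (among the rules handed to it, i.e. the top `best`)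
-- whose needle starts at the current position (lowered.startswith(needle, pos))
def bFindRule (suffix : List Char) : List (String × String) → Option Nat
  | [] => none
  | (needle, _) :: rest =>
    if needle.toList.isPrefixOf suffix then some 0
    else (bFindRule suffix rest).map (· + 1)

-- outer loop: 'for pos in range(len(lowered))', suffix = lowered[pos:], best accumulator
def bScanPos : List Char → Nat → Nat
  | [], best => best
  | suffix@(_ :: rest), best =>
    let best' := match bFindRule suffix (bRules.take best) with
      | some i => i
      | none => best
    bScanPos rest best'

def canonical_obligation_family_py_alt (value : String) : String :=
  match bRules[bScanPos (PySem.Str.lower (PySem.Str.strip value)).toList bRules.length]? with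
  | some (_, label) => label
  | none => "governance_other"

-- ===== PRECONDITION & SPEC =====
def Spec_canonical_obligation_family_py (value : String) (out : String) : Prop := out = canonical_obligation_family_py_alt value
instance (value : String) (out : String) : Decidable (Spec_canonical_obligation_family_py value out) := by unfold Spec_canonical_obligation_family_py; infer_instance

-- ===== CLAIM (what is proved, stated in full; the proofs are below) =====
def Claim_equal_canonical_obligation_family_py : Prop := ∀ (value : String), Dom_canonical_obligation_family_py value → Spec_canonical_obligation_family_py value (canonical_obligation_family_py value)

-- ===== LEMMAS AND PROOFS =====

-- index of the first rule whose needle is a prefix of l (rs.length if none)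
def pIdx (l : List Char) : List (String × String) → Nat
  | [] => 0
  | (n, _) :: rest => if n.toList.isPrefixOf l then 0 else pIdx l rest + 1

-- index of the first rule whose needle occurs anywhere in l (rs.length if none)
def cIdx (l : List Char) : List (String × String) → Nat
  | [] => 0
  | (n, _) :: rest => if PySem.Chars.isIn n.toList l then 0 else cIdx l rest + 1

-- reference first-match scan (string level), used to bridge to A
def refScan (l : String) : List (String × String) → String
  | [] => "governance_other"
  | (n, label) :: rest => if PySem.Str.isIn n l then label else refScan l rest

theorem pIdx_le (l : List Char) : ∀ rs : List (String × String), pIdx l rs ≤ rs.length := by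
  intro rs; induction rs with
  | nil => simp [pIdx]
  | cons p rest ih => obtain ⟨n, lab⟩ := p; simp only [pIdx, List.length_cons]; split <;> omega

theorem cIdx_le (l : List Char) : ∀ rs : List (String × String), cIdx l rs ≤ rs.length := by
  intro rs; induction rs with
  | nil => simp [cIdx]
  | cons p rest ih => obtain ⟨n, lab⟩ := p; simp only [cIdx, List.length_cons]; split <;> omega

-- the inner loop over the top `best` rules finds pIdx iff it is below best
theorem bFindRule_take (l : List Char) :
    ∀ (rs : List (String × String)) (best : Nat), best ≤ rs.length →
      bFindRule l (rs.take best) =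
        if pIdx l rs < best then some (pIdx l rs) else none := by
  intro rs; induction rs with
  | nil =>
    intro best hb
    have : best = 0 := Nat.le_zero.mp hb
    subst this
    simp [bFindRule]
  | cons p rest ih =>
    intro best hb
    obtain ⟨n, lab⟩ := p
    cases best with
    | zero => simp [bFindRule]
    | succ b =>
      have hb' : b ≤ rest.length := Nat.succ_le_succ_iff.mp hb
      simp only [List.take_succ_cons, bFindRule, pIdx]
      by_cases hp : n.toList.isPrefixOf l
      · simp [hp]
      · have ihb := ih b hb'
        by_cases hlt : pIdx l rest < b
        · have h1 : pIdx l rest + 1 < b + 1 := by omega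
          simp [hp, ihb, hlt, h1]
        · have h2 : ¬ pIdx l rest + 1 < b + 1 := by omega
          simp [hp, ihb, hlt, h2]

-- occurrence anywhere in c :: rest = prefix at the head position or occurrence in rest
theorem cIdx_cons (c : Char) (rest : List Char) :
    ∀ rs : List (String × String), cIdx (c :: rest) rs = min (pIdx (c :: rest) rs) (cIdx rest rs) := by
  intro rs; induction rs with
  | nil => simp [cIdx, pIdx]
  | cons p rs' ih =>
    obtain ⟨n, lab⟩ := p
    simp only [cIdx, pIdx]
    have hin : PySem.Chars.isIn n.toList (c :: rest)
        = (n.toList.isPrefixOf (c :: rest) || PySem.Chars.isIn n.toList rest) := by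
      rw [Bool.eq_iff_iff]
      simp only [Bool.or_eq_true, PySem.Chars.isIn_iff_infix, List.isPrefixOf_iff_prefix]
      exact List.infix_cons_iff
    rw [hin]
    by_cases hp : n.toList.isPrefixOf (c :: rest)
    · simp [hp]
    · by_cases hr : PySem.Chars.isIn n.toList rest
      · simp [hp, hr]
      · simp only [hp, hr, Bool.false_or, Bool.false_eq_true, if_false, ih]
        omega

-- needles are nonempty, so nothing occurs in the empty string
theorem cIdx_nil_bRules : cIdx [] bRules = bRules.length := by decide

-- main invariant of the position-major pass
theorem bScanPos_eq (l : List Char) :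
    ∀ best : Nat, best ≤ bRules.length → bScanPos l best = min best (cIdx l bRules) := by
  induction l with
  | nil =>
    intro best hb
    rw [cIdx_nil_bRules]
    simp only [bScanPos]
    omega
  | cons c rest ih =>
    intro best hb
    simp only [bScanPos]
    rw [bFindRule_take _ _ _ hb]
    rw [cIdx_cons]
    have hple := pIdx_le (c :: rest) bRules
    have hcle := cIdx_le rest bRules
    by_cases hlt : pIdx (c :: rest) bRules < best
    · simp only [hlt, if_true]
      rw [ih _ (le_trans (Nat.le_of_lt hlt) hb)]
      omega
    · simp only [hlt, if_false]
      rw [ih _ hb]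
      omega

-- looking the first-occurring rule up in the table is the first-match scan
theorem lookup_cIdx (s : String) :
    ∀ rs : List (String × String),
      (match rs[cIdx s.toList rs]? with
       | some (_, label) => label
       | none => "governance_other") = refScan s rs := by
  intro rs; induction rs with
  | nil => simp [cIdx, refScan]
  | cons p rest ih =>
    obtain ⟨n, lab⟩ := p
    simp only [cIdx, refScan, PySem.Str.isIn_eq]
    by_cases h : PySem.Chars.isIn n.toList s.toList
    · simp [h]
    · simp only [h, if_false]
      simpa using ih

-- B's value is the first-match scan
theorem alt_eq_refScan (value : String) :
    canonical_obligation_family_py_alt value =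
      refScan (PySem.Str.lower (PySem.Str.strip value)) bRules := by
  unfold canonical_obligation_family_py_alt
  rw [bScanPos_eq _ _ (le_refl _)]
  rw [Nat.min_eq_right (cIdx_le _ _)]
  have h := lookup_cIdx (PySem.Str.lower (PySem.Str.strip value)) bRules
  cases hx : bRules[cIdx (PySem.Str.lower (PySem.Str.strip value)).toList bRules]? with
  | none => rw [hx] at h; simpa using h
  | some q => obtain ⟨n, lab⟩ := q; rw [hx] at h; simpa using h

-- A's body equals the first-match scan, for any lowered string
theorem core_eq (l : String) :
    (if aoObligationFamilies.contains l then l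
     else
       match aFamilyLoop l aoObligationFamilies with
       | some f => f
       | none =>
         if PySem.Str.isIn "human rights" l || PySem.Str.isIn "civil rights" l then
           "rights_violation"
         else if PySem.Str.isIn "explain" l then "interpretability"
         else if PySem.Str.isIn "fair" l || PySem.Str.isIn "bias" l then "bias"
         else if PySem.Str.isIn "privacy" l || PySem.Str.isIn "data" l then "privacy"
         else if PySem.Str.isIn "transparen" l || PySem.Str.isIn "notice" l then
           "transparency"
         else "governance_other") = refScan l bRules := by
  by_cases hmem : aoObligationFamilies.contains l
  · simp only [aoObligationFamilies, List.contains_eq_mem, List.mem_cons,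
      List.not_mem_nil, or_false, decide_eq_true_eq] at hmem
    rcases hmem with h | h | h | h | h | h | h <;> subst h <;> decide
  · simp only [hmem, if_false]
    by_cases h1 : PySem.Str.isIn "privacy" l <;>
      by_cases h2 : PySem.Str.isIn "bias" l <;>
        simp only [aoObligationFamilies, bRules, aFamilyLoop, refScan, h1, h2,
          Bool.false_eq_true, if_true, if_false, Bool.or_false, Bool.false_or] <;>
    by_cases h3 : PySem.Str.isIn "discrimination" l <;>
      by_cases h4 : PySem.Str.isIn "transparency" l <;>
        simp only [aFamilyLoop, refScan, h3, h4, Bool.false_eq_true, if_true, if_false] <;>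
    by_cases h5 : PySem.Str.isIn "rights_violation" l <;>
      by_cases h6 : PySem.Str.isIn "interpretability" l <;>
        by_cases h7 : PySem.Str.isIn "governance_other" l <;>
          simp only [aFamilyLoop, refScan, h5, h6, h7, Bool.false_eq_true, if_true, if_false] <;>
    by_cases k1 : PySem.Str.isIn "human rights" l <;>
      by_cases k2 : PySem.Str.isIn "civil rights" l <;>
        by_cases k3 : PySem.Str.isIn "explain" l <;>
          by_cases k4 : PySem.Str.isIn "fair" l <;>
            by_cases k5 : PySem.Str.isIn "data" l <;>
              by_cases k6 : PySem.Str.isIn "transparen" l <;>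
                by_cases k7 : PySem.Str.isIn "notice" l <;>
                  simp only [refScan, k1, k2, k3, k4, k5, k6, k7, h1, h2, h4,
                    Bool.false_eq_true, true_or, or_true, false_or, or_false, or_self,
                    Bool.true_or, Bool.or_true, Bool.false_or, Bool.or_false, Bool.or_self,
                    if_true, if_false]

-- ===== VERDICT (by name: the statement is the Claim_ definition above) =====
theorem canonical_obligation_family_py_spec : Claim_equal_canonical_obligation_family_py := by
  intro value _
  unfold Spec_canonical_obligation_family_py canonical_obligation_family_py
  rw [alt_eq_refScan]
  exact core_eq (PySem.Str.lower (PySem.Str.strip value))
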